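-- pv_equiv track=rewrite | github.com/BartMassey/numeric-cores | cores.py | make_seq
-- ===== SOURCE A (Python) =====
-- def make_seq(digits, part):
--     result = []
--     i = 0
--     for n in part:
--         ds = digits[i:i+n]
--         result.append(ds)
--         i += n
--     return result
-- ===== SOURCE B (Python) =====
-- def make_seq(digits, part):
--     bounds = []
--     s = 0
--     for n in part:
--         s += n
--         bounds.append(s)
--     return [digits[a:b] for a, b in zip([0] + bounds, bounds)]
-- ===== Notes on version B (the rewrite author's own statement) =====
-- stated objective: alternative
-- what changed: B first computes the prefix-sum boundary table in its own pass, then produces every chunk by slicing between consecutive boundary pairs in a comprehension, instead of threading one running index while appending slices.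
import Mathlib
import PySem

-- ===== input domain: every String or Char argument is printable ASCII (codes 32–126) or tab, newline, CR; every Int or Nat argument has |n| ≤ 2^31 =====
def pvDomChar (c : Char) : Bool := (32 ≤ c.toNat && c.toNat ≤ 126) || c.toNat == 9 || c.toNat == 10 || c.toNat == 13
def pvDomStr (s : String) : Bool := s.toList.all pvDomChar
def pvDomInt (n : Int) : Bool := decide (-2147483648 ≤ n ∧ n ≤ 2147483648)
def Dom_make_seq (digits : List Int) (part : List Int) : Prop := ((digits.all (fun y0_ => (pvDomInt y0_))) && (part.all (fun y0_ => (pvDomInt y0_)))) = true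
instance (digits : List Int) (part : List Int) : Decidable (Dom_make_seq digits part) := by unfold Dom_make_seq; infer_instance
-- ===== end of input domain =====

-- B computes the prefix-sum boundary table first, then slices between consecutive boundary pairs (alternative decomposition, same cost).

-- ===== PORT A =====
-- result = []; i = 0; for n in part: result.append(digits[i:i+n]); i += n
def make_seq (digits : List Int) (part : List Int) : List (List Int) :=
  (part.foldl
    (fun (st : List (List Int) × Int) n =>
      (st.1 ++ [PySem.List.slice digits (some st.2) (some (st.2 + n))], st.2 + n))
    ([], 0)).1

-- ===== PORT B =====
-- bounds = []; s = 0; for n in part: s += n; bounds.append(s)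
def pvBounds (part : List Int) : List Int :=
  (part.foldl (fun (st : List Int × Int) n => (st.1 ++ [st.2 + n], st.2 + n)) ([], 0)).1

-- [digits[a:b] for a, b in zip([0] + bounds, bounds)]
def make_seq_alt (digits : List Int) (part : List Int) : List (List Int) :=
  ((List.zip (0 :: pvBounds part) (pvBounds part)).map
    (fun p => PySem.List.slice digits (some p.1) (some p.2)))

-- ===== PRECONDITION & SPEC =====
def Spec_make_seq (digits : List Int) (part : List Int) (out : List (List Int)) : Prop := out = make_seq_alt digits part
instance (digits : List Int) (part : List Int) (out : List (List Int)) : Decidable (Spec_make_seq digits part out) := by unfold Spec_make_seq; infer_instance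

-- ===== CLAIM (what is proved, stated in full; the proofs are below) =====
def Claim_equal_make_seq : Prop := ∀ (digits : List Int) (part : List Int), Dom_make_seq digits part → Spec_make_seq digits part (make_seq digits part)

-- ===== LEMMAS AND PROOFS =====

-- common reference shape: the list of slices starting at offset i
def pvChunks (digits : List Int) (i : Int) : List Int → List (List Int)
  | [] => []
  | n :: ns => PySem.List.slice digits (some i) (some (i + n)) :: pvChunks digits (i + n) ns

-- boundary list from offset s
def pvBoundsFrom (s : Int) : List Int → List Int
  | [] => []
  | n :: ns => (s + n) :: pvBoundsFrom (s + n) ns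

theorem makeA_loop (digits : List Int) (part : List Int) :
    ∀ (acc : List (List Int)) (i : Int),
      (part.foldl
        (fun (st : List (List Int) × Int) n =>
          (st.1 ++ [PySem.List.slice digits (some st.2) (some (st.2 + n))], st.2 + n))
        (acc, i)).1 = acc ++ pvChunks digits i part := by
  induction part with
  | nil => intro acc i; simp [pvChunks]
  | cons n ns ih =>
      intro acc i
      simp only [List.foldl_cons, pvChunks]
      rw [ih]
      simp

theorem bounds_loop (part : List Int) :
    ∀ (acc : List Int) (s : Int),
      (part.foldl (fun (st : List Int × Int) n => (st.1 ++ [st.2 + n], st.2 + n)) (acc, s)).1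
        = acc ++ pvBoundsFrom s part := by
  induction part with
  | nil => intro acc s; simp [pvBoundsFrom]
  | cons n ns ih =>
      intro acc s
      simp only [List.foldl_cons, pvBoundsFrom]
      rw [ih]
      simp

theorem zip_bounds (digits : List Int) (part : List Int) :
    ∀ (s : Int),
      (List.zip (s :: pvBoundsFrom s part) (pvBoundsFrom s part)).map
        (fun p => PySem.List.slice digits (some p.1) (some p.2)) = pvChunks digits s part := by
  induction part with
  | nil => intro s; simp [pvBoundsFrom, pvChunks]
  | cons n ns ih =>
      intro s
      simp only [pvBoundsFrom, pvChunks, List.zip_cons_cons, List.map_cons]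
      exact congrArg _ (ih (s + n))

-- ===== VERDICT (by name: the statement is the Claim_ definition above) =====
theorem make_seq_spec : Claim_equal_make_seq := by
  intro digits part _
  unfold Spec_make_seq make_seq make_seq_alt pvBounds
  rw [makeA_loop, bounds_loop]
  simp only [List.nil_append]
  exact (zip_bounds digits part 0).symm
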